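-- pv_equiv track=rewrite | github.com/juliotoribio/ghost_yt_transcription | ghost_yt_downloader.py | _find_matching_subtitle_url
-- ===== SOURCE A (Python) =====
-- from typing import Any
--
-- def _get_json3_url(format_list: list[dict[str, Any]]) -> str | None:
--     for fmt in format_list:
--         if fmt.get("ext") == "json3":
--             return fmt.get("url")
--     return None
--
-- def _find_matching_subtitle_url(
--     subtitles: dict[str, list[dict[str, Any]]], preferred_language: str
-- ) -> tuple[str, str | None]:
--     for lang_code in _iter_language_matches(subtitles, preferred_language):
--         url = _get_json3_url(subtitles[lang_code])
--         if url:
--             return lang_code, url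
--     return preferred_language, None
--
-- def _iter_language_matches(
--     subtitles: dict[str, list[dict[str, Any]]], preferred_language: str
-- ) -> list[str]:
--     normalized_preference = _normalize_language_code(preferred_language)
--     exact_matches = [
--         lang_code
--         for lang_code in subtitles
--         if _normalize_language_code(lang_code) == normalized_preference
--     ]
--     if exact_matches:
--         return exact_matches
--
--     preferred_base = normalized_preference.split("-", maxsplit=1)[0]
--     return [
--         lang_code
--         for lang_code in subtitles
--         if _normalize_language_code(lang_code).split("-", maxsplit=1)[0]
--         == preferred_base
--     ]
--
-- def _normalize_language_code(language_code: str) -> str: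
--     return language_code.strip().lower().replace("_", "-")
-- ===== SOURCE B (Python) =====
-- def _find_matching_subtitle_url(subtitles, preferred_language):
--     pref = preferred_language.strip().lower().replace("_", "-")
--     pref_base = pref.split("-", 1)[0]
--     exact_seen = False
--     base_hit = None
--     for lang, fmts in subtitles.items():
--         code = lang.strip().lower().replace("_", "-")
--         if code == pref:
--             exact_seen = True
--             url = next((f.get("url") for f in fmts if f.get("ext") == "json3"), None)
--             if url:
--                 return lang, url
--         elif base_hit is None and code.split("-", 1)[0] == pref_base:
--             url = next((f.get("url") for f in fmts if f.get("ext") == "json3"), None)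
--             if url:
--                 base_hit = (lang, url)
--     if exact_seen or base_hit is None:
--         return preferred_language, None
--     return base_hit
-- ===== Notes on version B (the rewrite author's own statement) =====
-- stated objective: simpler
-- what changed: A builds an exact-match list and, if empty, a base-match list via two comprehensions and then rescans with dict lookups; B is one pass over subtitles.items() that normalizes each code once, returns the first exact match with a json3 URL immediately, and tracks an exact-seen flag plus the first base-tier hit for the fallback.
import Mathlib
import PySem

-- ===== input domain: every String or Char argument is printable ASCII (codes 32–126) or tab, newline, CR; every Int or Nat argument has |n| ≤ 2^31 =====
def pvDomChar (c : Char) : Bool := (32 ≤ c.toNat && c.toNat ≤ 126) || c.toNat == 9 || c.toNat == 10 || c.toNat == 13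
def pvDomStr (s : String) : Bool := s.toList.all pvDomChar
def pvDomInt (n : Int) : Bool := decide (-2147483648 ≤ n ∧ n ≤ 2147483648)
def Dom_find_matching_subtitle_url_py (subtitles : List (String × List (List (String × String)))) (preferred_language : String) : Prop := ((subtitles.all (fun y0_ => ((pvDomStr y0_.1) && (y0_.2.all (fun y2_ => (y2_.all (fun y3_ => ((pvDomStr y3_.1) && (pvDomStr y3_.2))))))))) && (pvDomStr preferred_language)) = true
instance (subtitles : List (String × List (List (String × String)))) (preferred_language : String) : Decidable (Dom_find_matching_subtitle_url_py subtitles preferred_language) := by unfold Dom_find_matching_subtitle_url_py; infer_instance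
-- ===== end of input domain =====

-- B replaces A's two filter comprehensions plus lookup-based rescan by one pass over the items
-- that tracks an exact-seen flag and the first base-tier hit (objective: simpler single traversal).


-- shared helpers: Python-dict semantics of the two normalization expressions both sources use
-- _normalize_language_code: s.strip().lower().replace("_", "-")
def pvNorm (s : String) : String := PySem.Str.replace (PySem.Str.lower (PySem.Str.strip s)) "_" "-"
-- s.split("-", maxsplit=1)[0]  (split with a nonempty sep always yields a nonempty list, so [0] is total)
def pvBase (s : String) : String :=
  match PySem.Str.splitMax? s "-" 1 with
  | some (h :: _) => h
  | _ => s
-- Python truthiness of `url` (str | None): truthy iff a nonempty string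
def pvTruthy : Option String → Bool
  | some s => s != ""
  | none => false

-- ===== PORT A =====
-- _get_json3_url: loop over format_list, return fmt.get("url") at the first fmt with ext == "json3"
def getJson3A : List (List (String × String)) → Option String
  | [] => none
  | fmt :: rest =>
    if (PySem.Dict.mk fmt).get? "ext" == some "json3" then (PySem.Dict.mk fmt).get? "url"
    else getJson3A rest

-- _iter_language_matches: exact-match comprehension, else base-match comprehension
def iterLangMatchesA (subtitles : List (String × List (List (String × String)))) (preferred_language : String) : List String :=
  let np := pvNorm preferred_language
  let exact := (subtitles.map Prod.fst).filter (fun k => pvNorm k == np)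
  if !exact.isEmpty then exact
  else
    let prefBase := pvBase np
    (subtitles.map Prod.fst).filter (fun k => pvBase (pvNorm k) == prefBase)

-- the for-loop of _find_matching_subtitle_url, with subtitles[lang_code] as a dict lookup
def loopA (d : PySem.Dict String (List (List (String × String)))) (preferred_language : String) : List String → String × Option String
  | [] => (preferred_language, none)
  | k :: ks =>
    let url := getJson3A (d.getD k [])
    if pvTruthy url then (k, url) else loopA d preferred_language ks

def find_matching_subtitle_url_py (subtitles : List (String × List (List (String × String)))) (preferred_language : String) : String × Option String :=
  loopA (PySem.Dict.mk subtitles) preferred_language (iterLangMatchesA subtitles preferred_language)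

-- ===== PORT B =====
-- next((f.get("url") for f in fmts if f.get("ext") == "json3"), None)
def pvJson3 (fmts : List (List (String × String))) : Option String :=
  (fmts.find? (fun f => (PySem.Dict.mk f).get? "ext" == some "json3")).bind
    (fun f => (PySem.Dict.mk f).get? "url")

-- the single pass of Source B: state = (exact_seen, base_hit)
def goB (preferred_language np npBase : String) : List (String × List (List (String × String))) → Bool → Option (String × String) → String × Option String
  | [], exactSeen, baseHit =>
    if exactSeen then (preferred_language, none)
    else
      match baseHit with
      | some (k, u) => (k, some u)
      | none => (preferred_language, none)
  | (lang, fmts) :: rest, exactSeen, baseHit =>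
    let code := pvNorm lang
    if code == np then
      match pvJson3 fmts with
      | some u => if u != "" then (lang, some u) else goB preferred_language np npBase rest true baseHit
      | none => goB preferred_language np npBase rest true baseHit
    else if baseHit.isNone && (pvBase code == npBase) then
      match pvJson3 fmts with
      | some u =>
        if u != "" then goB preferred_language np npBase rest exactSeen (some (lang, u))
        else goB preferred_language np npBase rest exactSeen baseHit
      | none => goB preferred_language np npBase rest exactSeen baseHit
    else goB preferred_language np npBase rest exactSeen baseHit

def find_matching_subtitle_url_py_alt (subtitles : List (String × List (List (String × String)))) (preferred_language : String) : String × Option String :=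
  let np := pvNorm preferred_language
  goB preferred_language np (pvBase np) subtitles false none

-- ===== PRECONDITION & SPEC =====
-- Pre_ excludes association lists carrying a duplicate key (in subtitles or inside a format dict):
-- those do not represent a Python dict — dict construction collapses duplicates (last value wins),
-- so the assoc-list reading with first-match lookup is ambiguous there.
def Pre_find_matching_subtitle_url_py (subtitles : List (String × List (List (String × String)))) (preferred_language : String) : Prop :=
  List.Nodup (subtitles.map Prod.fst) ∧ ∀ p ∈ subtitles, ∀ fmt ∈ p.2, List.Nodup (fmt.map Prod.fst)
instance (subtitles : List (String × List (List (String × String)))) (preferred_language : String) : Decidable (Pre_find_matching_subtitle_url_py subtitles preferred_language) := by unfold Pre_find_matching_subtitle_url_py; infer_instance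
def pvWitness_find_matching_subtitle_url_py : (List (String × List (List (String × String)))) × String :=
  ([("en", [[("ext", "json3"), ("url", "u")]]), ("fr", [])], "EN")

def Spec_find_matching_subtitle_url_py (subtitles : List (String × List (List (String × String)))) (preferred_language : String) (out : String × Option String) : Prop := out = find_matching_subtitle_url_py_alt subtitles preferred_language
instance (subtitles : List (String × List (List (String × String)))) (preferred_language : String) (out : String × Option String) : Decidable (Spec_find_matching_subtitle_url_py subtitles preferred_language out) := by unfold Spec_find_matching_subtitle_url_py; infer_instance

-- ===== CLAIM (what is proved, stated in full; the proofs are below) =====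
def Claim_equal_find_matching_subtitle_url_py : Prop := ∀ (subtitles : List (String × List (List (String × String)))) (preferred_language : String), Dom_find_matching_subtitle_url_py subtitles preferred_language → Pre_find_matching_subtitle_url_py subtitles preferred_language → Spec_find_matching_subtitle_url_py subtitles preferred_language (find_matching_subtitle_url_py subtitles preferred_language)

-- ===== LEMMAS AND PROOFS =====

-- reference shapes used by the proof
def eFilter (np : String) (l : List (String × List (List (String × String)))) : List (String × List (List (String × String))) :=
  l.filter (fun p => pvNorm p.1 == np)
def bFilter (npBase : String) (l : List (String × List (List (String × String)))) : List (String × List (List (String × String))) :=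
  l.filter (fun p => pvBase (pvNorm p.1) == npBase)
def firstHit (l : List (String × List (List (String × String)))) : Option (String × Option String) :=
  match l.find? (fun p => pvTruthy (pvJson3 p.2)) with
  | some p => some (p.1, pvJson3 p.2)
  | none => none

def refR (pref np npBase : String) (l : List (String × List (List (String × String)))) (seen : Bool) (bh : Option (String × String)) : String × Option String :=
  match firstHit (eFilter np l) with
  | some r => r
  | none =>
    if seen || !(eFilter np l).isEmpty then (pref, none)
    else
      match bh with
      | some (k, u) => (k, some u)
      | none =>
        match firstHit (bFilter npBase l) with
        | some r => r
        | none => (pref, none)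

theorem json3A_eq (fl : List (List (String × String))) : getJson3A fl = pvJson3 fl := by
  induction fl with
  | nil => rfl
  | cons fmt rest ih =>
    simp only [getJson3A, pvJson3, List.find?_cons]
    by_cases h : ((PySem.Dict.mk fmt).get? "ext" == some "json3") = true
    · simp [h, Option.bind]
    · simp only [Bool.not_eq_true] at h
      simp [h, ih, pvJson3]

theorem firstHit_cons_pos (p : String × List (List (String × String))) (l : List (String × List (List (String × String)))) (h : pvTruthy (pvJson3 p.2) = true) :
    firstHit (p :: l) = some (p.1, pvJson3 p.2) := by
  unfold firstHit
  rw [List.find?_cons_of_pos (p := fun q : String × List (List (String × String)) => pvTruthy (pvJson3 q.2)) (a := p) (l := l) h]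

theorem firstHit_cons_neg (p : String × List (List (String × String))) (l : List (String × List (List (String × String)))) (h : pvTruthy (pvJson3 p.2) = false) :
    firstHit (p :: l) = firstHit l := by
  unfold firstHit
  rw [List.find?_cons_of_neg (p := fun q : String × List (List (String × String)) => pvTruthy (pvJson3 q.2)) (a := p) (l := l) (by simp [h])]

theorem goB_eq_refR (pref np npBase : String) (l : List (String × List (List (String × String)))) (seen : Bool) (bh : Option (String × String)) :
    goB pref np npBase l seen bh = refR pref np npBase l seen bh := by
  induction l generalizing seen bh with
  | nil =>
    cases bh with
    | none => cases seen <;> rfl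
    | some p => cases p; cases seen <;> rfl
  | cons p rest ih =>
    obtain ⟨lang, fmts⟩ := p
    simp only [goB]
    by_cases hx : (pvNorm lang == np) = true
    · -- exact element
      simp only [hx, if_pos]
      have hE : eFilter np ((lang, fmts) :: rest) = (lang, fmts) :: eFilter np rest := by
        simp [eFilter, hx]
      cases hu : pvJson3 fmts with
      | some u =>
        by_cases hne : (u != "") = true
        · simp only [hne, if_pos]
          have hfh : firstHit (eFilter np ((lang, fmts) :: rest)) = some (lang, some u) := by
            rw [hE, firstHit_cons_pos _ _ (by simp [pvTruthy, hu, hne]), hu]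
          unfold refR
          rw [hfh]
        · simp only [Bool.not_eq_true] at hne
          simp only [hne, Bool.false_eq_true, if_false, ih]
          unfold refR
          rw [hE, firstHit_cons_neg _ _ (by simp [pvTruthy, hu, hne])]
          cases hf : firstHit (eFilter np rest) with
          | some r => rfl
          | none => simp
      | none =>
        simp only [ih]
        unfold refR
        rw [hE, firstHit_cons_neg _ _ (by simp [pvTruthy, hu])]
        cases hf : firstHit (eFilter np rest) with
        | some r => rfl
        | none => simp
    · -- non-exact element
      simp only [Bool.not_eq_true] at hx
      simp only [hx, Bool.false_eq_true, if_false]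
      have hE : eFilter np ((lang, fmts) :: rest) = eFilter np rest := by
        simp [eFilter, hx]
      by_cases hb : (bh.isNone && (pvBase (pvNorm lang) == npBase)) = true
      · simp only [hb, if_pos]
        rw [Bool.and_eq_true] at hb
        obtain ⟨hbn, hbm⟩ := hb
        have hbh : bh = none := by cases bh <;> simp_all [Option.isNone]
        subst hbh
        have hB : bFilter npBase ((lang, fmts) :: rest) = (lang, fmts) :: bFilter npBase rest := by
          simp [bFilter, hbm]
        cases hu : pvJson3 fmts with
        | some u =>
          by_cases hne : (u != "") = true
          · simp only [hne, if_pos, ih]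
            have hfb : firstHit (bFilter npBase ((lang, fmts) :: rest)) = some (lang, some u) := by
              rw [hB, firstHit_cons_pos _ _ (by simp [pvTruthy, hu, hne]), hu]
            unfold refR
            rw [hE, hfb]
          · simp only [Bool.not_eq_true] at hne
            simp only [hne, Bool.false_eq_true, if_false, ih]
            unfold refR
            rw [hE, hB, firstHit_cons_neg _ _ (by simp [pvTruthy, hu, hne])]
        | none =>
          simp only [ih]
          unfold refR
          rw [hE, hB, firstHit_cons_neg _ _ (by simp [pvTruthy, hu])]
      · simp only [hb, Bool.false_eq_true, if_false, ih]
        have hbm : ∀ (_ : bh = none), (pvBase (pvNorm lang) == npBase) = false := by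
          intro hbn; subst hbn; simpa [Option.isNone] using hb
        cases bh with
        | some q =>
          obtain ⟨qk, qu⟩ := q
          unfold refR
          rw [hE]
        | none =>
          have hB : bFilter npBase ((lang, fmts) :: rest) = bFilter npBase rest := by
            simp [bFilter, hbm rfl]
          unfold refR
          rw [hE, hB]

theorem lookup_eq (l : List (String × List (List (String × String)))) (hnd : (l.map Prod.fst).Nodup)
    (p : String × List (List (String × String))) (hp : p ∈ l) :
    (PySem.Dict.mk l).getD p.1 [] = p.2 :=
  PySem.Dict.getD_of_mem_items (d := PySem.Dict.mk l) (k := p.1) (v := p.2) hp hnd []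

theorem loopA_eq (d : PySem.Dict String (List (List (String × String)))) (pref : String)
    (m : List (String × List (List (String × String))))
    (hm : ∀ p ∈ m, d.getD p.1 [] = p.2) :
    loopA d pref (m.map Prod.fst) =
      (match firstHit m with
       | some r => r
       | none => (pref, none)) := by
  induction m with
  | nil => rfl
  | cons p rest ih =>
    have hp := hm p (by simp)
    have hrest : ∀ q ∈ rest, d.getD q.1 [] = q.2 := fun q hq => hm q (by simp [hq])
    simp only [List.map_cons, loopA, hp, json3A_eq]
    by_cases ht : pvTruthy (pvJson3 p.2) = true
    · simp [ht, firstHit]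
    · simp only [Bool.not_eq_true] at ht
      simp [ht, ih hrest, firstHit]

theorem A_eq_refR (l : List (String × List (List (String × String)))) (pref : String)
    (hnd : (l.map Prod.fst).Nodup) :
    find_matching_subtitle_url_py l pref = refR pref (pvNorm pref) (pvBase (pvNorm pref)) l false none := by
  have hmapE : (l.map Prod.fst).filter (fun k => pvNorm k == pvNorm pref) = (eFilter (pvNorm pref) l).map Prod.fst := by
    rw [List.filter_map]; rfl
  have hmapB : (l.map Prod.fst).filter (fun k => pvBase (pvNorm k) == pvBase (pvNorm pref)) = (bFilter (pvBase (pvNorm pref)) l).map Prod.fst := by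
    rw [List.filter_map]; rfl
  unfold find_matching_subtitle_url_py iterLangMatchesA
  simp only [hmapE, hmapB]
  by_cases he : ((eFilter (pvNorm pref) l).map Prod.fst).isEmpty = true
  · have he' : eFilter (pvNorm pref) l = [] := by
      cases h : eFilter (pvNorm pref) l <;> simp_all
    rw [he']
    simp only [List.map_nil, List.isEmpty_nil, Bool.not_true, Bool.false_eq_true, if_false]
    rw [loopA_eq _ _ _ (fun q hq => lookup_eq l hnd q (List.mem_of_mem_filter (p := fun p => pvBase (pvNorm p.1) == pvBase (pvNorm pref)) (by simpa [bFilter] using hq)))]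
    simp [refR, he', firstHit]
  · simp only [Bool.not_eq_true] at he
    simp only [he, Bool.not_false, if_pos]
    rw [loopA_eq _ _ _ (fun q hq => lookup_eq l hnd q (List.mem_of_mem_filter (p := fun p => pvNorm p.1 == pvNorm pref) (by simpa [eFilter] using hq)))]
    have hne : (eFilter (pvNorm pref) l).isEmpty = false := by
      cases h : eFilter (pvNorm pref) l <;> simp_all
    unfold refR
    cases h : firstHit (eFilter (pvNorm pref) l) with
    | some r => rfl
    | none => simp [hne]

-- ===== VERDICT (by name: the statement is the Claim_ definition above) =====
theorem find_matching_subtitle_url_py_spec : Claim_equal_find_matching_subtitle_url_py := by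
  intro subtitles preferred_language _hdom hpre
  unfold Spec_find_matching_subtitle_url_py
  rw [A_eq_refR subtitles preferred_language hpre.1]
  unfold find_matching_subtitle_url_py_alt
  rw [goB_eq_refR]
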